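-- pv_equiv track=rewrite | github.com/cslu-nlp/DetectorMorse | detectormorse.py | token_case
-- ===== SOURCE A (Python) =====
-- from string import ascii_lowercase, ascii_uppercase, digits
--
-- DIGITS = frozenset(digits)
--
-- LOWERCASE = frozenset(ascii_lowercase)
--
-- UPPERCASE = frozenset(ascii_uppercase)
--
-- LETTERS = LOWERCASE | UPPERCASE
--
-- QUOTE_TOKEN = "*QUOTE*"
--
-- NUMBER_TOKEN = "*NUMBER*"
--
-- def token_case(string):
--     """
--     Compute one of six "cases" for a token:
--     * number: is the NUMBER_TOKEN or contains a digit
--     * punctuation: is the QUOTE_TOKEN or contains no alphabetic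
--       characters
--     * upper: all alphabetic characters are uppercase
--     * lower: all alphabetic characters are lowercase
--     * title: first alphabetic character uppercase, later alphabetic
--              characters lowercase
--     * mixed: none of the above
--     """
--     # TODO possible improvements/tweaks:
--     #     * should we just look at the first letter, merging mixed with
--     #       upper and lower, and merging upper and title?
--     #     * should there be 2 features, one for the first letter and
--     #       another for the rest-of-word?
--     #     * should this be an instance method
--     if string == NUMBER_TOKEN or any(ch in DIGITS for ch in string):
--         return "number"
--     # remove non-alphabetic characters
--     rstring = "".join(ch for ch in string if ch in LETTERS)
--     # if there aren't any, it's punctuation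
--     if string == QUOTE_TOKEN or not rstring:
--         return "punctuation"
--     if rstring[0] in UPPERCASE:
--         if all(char in UPPERCASE for char in rstring[1:]):
--             return "upper"
--             # note that one-letter tokens will pass this test, and so
--             # be coded as uppercase, not titlecase
--         elif all(char in LOWERCASE for char in rstring[1:]):
--             return "title"
--         # mixed
--     if all(char in LOWERCASE for char in rstring):
--         return "lower"
--     return "mixed"
-- ===== SOURCE B (Python) =====
-- QUOTE_TOKEN = "*QUOTE*"
-- NUMBER_TOKEN = "*NUMBER*"
--
-- def token_case(string):
--     # single left-to-right pass: no filtered intermediate string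
--     saw_digit = False
--     first_upper = None        # case of first alphabetic char, or None
--     rest_all_upper = True     # over alphabetic chars after the first
--     rest_all_lower = True
--     for ch in string:
--         if '0' <= ch <= '9':
--             saw_digit = True
--         elif 'A' <= ch <= 'Z':
--             if first_upper is None:
--                 first_upper = True
--             else:
--                 rest_all_lower = False
--         elif 'a' <= ch <= 'z':
--             if first_upper is None:
--                 first_upper = False
--             else:
--                 rest_all_upper = False
--     if string == NUMBER_TOKEN or saw_digit:
--         return "number"
--     if string == QUOTE_TOKEN or first_upper is None:
--         return "punctuation"
--     if first_upper:
--         if rest_all_upper: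
--             return "upper"
--         if rest_all_lower:
--             return "title"
--         return "mixed"
--     return "lower" if rest_all_lower else "mixed"
-- ===== Notes on version B (the rewrite author's own statement) =====
-- stated objective: alternative
-- what changed: B classifies the token in one left-to-right pass over the string, tracking saw_digit, the case of the first letter and rest-all-upper/rest-all-lower flags, instead of A's several membership scans plus building a filtered intermediate string.
import Mathlib
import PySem

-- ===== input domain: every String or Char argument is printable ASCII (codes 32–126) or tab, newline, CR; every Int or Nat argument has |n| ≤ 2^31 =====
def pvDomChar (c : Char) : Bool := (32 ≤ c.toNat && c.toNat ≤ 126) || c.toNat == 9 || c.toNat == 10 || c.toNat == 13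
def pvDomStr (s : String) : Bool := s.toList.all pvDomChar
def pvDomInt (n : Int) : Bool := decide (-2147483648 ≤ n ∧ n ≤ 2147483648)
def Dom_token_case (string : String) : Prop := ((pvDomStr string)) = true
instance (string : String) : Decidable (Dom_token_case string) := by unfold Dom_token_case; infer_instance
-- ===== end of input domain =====

-- B replaces A's filtered intermediate string and repeated membership scans by one
-- left-to-right pass tracking flags (alternative decomposition; same observable result).

-- ===== PORT A =====
def pvDIGITS : List Char := ['0','1','2','3','4','5','6','7','8','9']
def pvLOWERCASE : List Char := ['a','b','c','d','e','f','g','h','i','j','k','l','m','n','o','p','q','r','s','t','u','v','w','x','y','z']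
def pvUPPERCASE : List Char := ['A','B','C','D','E','F','G','H','I','J','K','L','M','N','O','P','Q','R','S','T','U','V','W','X','Y','Z']
def pvLETTERS : List Char := pvLOWERCASE ++ pvUPPERCASE

def token_case (string : String) : String :=
  if string = "*NUMBER*" ∨ string.toList.any (fun ch => pvDIGITS.contains ch) then "number"
  else
    -- rstring = "".join(ch for ch in string if ch in LETTERS)
    let rstring := string.toList.filter (fun ch => pvLETTERS.contains ch)
    if string = "*QUOTE*" ∨ rstring = [] then "punctuation"
    else if pvUPPERCASE.contains (rstring.headD ' ') then
      if (rstring.drop 1).all (fun ch => pvUPPERCASE.contains ch) then "upper"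
      else if (rstring.drop 1).all (fun ch => pvLOWERCASE.contains ch) then "title"
      -- Python falls through (no else-return) to the final checks:
      else if rstring.all (fun ch => pvLOWERCASE.contains ch) then "lower"
      else "mixed"
    else if rstring.all (fun ch => pvLOWERCASE.contains ch) then "lower"
    else "mixed"

-- ===== PORT B =====
-- state: (saw_digit, first_upper : Option Bool, rest_all_upper, rest_all_lower)
def pvStep (s : Bool × Option Bool × Bool × Bool) (ch : Char) : Bool × Option Bool × Bool × Bool :=
  if '0' ≤ ch ∧ ch ≤ '9' then (true, s.2.1, s.2.2.1, s.2.2.2)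
  else if 'A' ≤ ch ∧ ch ≤ 'Z' then
    match s.2.1 with
    | none => (s.1, some true, s.2.2.1, s.2.2.2)
    | some b => (s.1, some b, s.2.2.1, false)
  else if 'a' ≤ ch ∧ ch ≤ 'z' then
    match s.2.1 with
    | none => (s.1, some false, s.2.2.1, s.2.2.2)
    | some b => (s.1, some b, false, s.2.2.2)
  else s

def token_case_alt (string : String) : String :=
  let st := string.toList.foldl pvStep (false, none, true, true)
  if string = "*NUMBER*" ∨ st.1 = true then "number"
  else if string = "*QUOTE*" ∨ st.2.1 = none then "punctuation"
  else if st.2.1 = some true then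
    if st.2.2.1 then "upper"
    else if st.2.2.2 then "title"
    else "mixed"
  else if st.2.2.2 then "lower"
  else "mixed"

-- ===== PRECONDITION & SPEC =====
def Spec_token_case (string : String) (out : String) : Prop := out = token_case_alt string
instance (string : String) (out : String) : Decidable (Spec_token_case string out) := by unfold Spec_token_case; infer_instance

-- ===== CLAIM (what is proved, stated in full; the proofs are below) =====
def Claim_equal_token_case : Prop := ∀ (string : String), Dom_token_case string → Spec_token_case string (token_case string)

-- ===== LEMMAS AND PROOFS =====
def pvDig (ch : Char) : Bool := decide ('0' ≤ ch ∧ ch ≤ '9')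
def pvUp (ch : Char) : Bool := decide ('A' ≤ ch ∧ ch ≤ 'Z')
def pvLow (ch : Char) : Bool := decide ('a' ≤ ch ∧ ch ≤ 'z')
def pvLet (ch : Char) : Bool := pvUp ch || pvLow ch

theorem char_eq_toNat (c d : Char) : (c = d) = (c.toNat = d.toNat) := by
  ext; constructor
  · rintro rfl; rfl
  · intro h; exact Char.ext (UInt32.toNat.inj h)

theorem char_le_toNat (c d : Char) : (c ≤ d) ↔ (c.toNat ≤ d.toNat) := Iff.rfl

theorem bridge_dig (c : Char) : pvDIGITS.contains c = pvDig c := by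
  simp only [pvDIGITS, pvDig, List.contains_eq_mem, List.mem_cons, List.not_mem_nil, or_false,
    char_eq_toNat, char_le_toNat, decide_eq_decide]
  simp only [Char.reduceToNat]
  omega

theorem bridge_up (c : Char) : pvUPPERCASE.contains c = pvUp c := by
  simp only [pvUPPERCASE, pvUp, List.contains_eq_mem, List.mem_cons, List.not_mem_nil, or_false,
    char_eq_toNat, char_le_toNat, decide_eq_decide]
  simp only [Char.reduceToNat]
  omega

theorem bridge_low (c : Char) : pvLOWERCASE.contains c = pvLow c := by
  simp only [pvLOWERCASE, pvLow, List.contains_eq_mem, List.mem_cons, List.not_mem_nil, or_false,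
    char_eq_toNat, char_le_toNat, decide_eq_decide]
  simp only [Char.reduceToNat]
  omega

theorem bridge_let (c : Char) : pvLETTERS.contains c = pvLet c := by
  simp only [pvLETTERS, pvLet, List.contains_append, bridge_low, bridge_up, Bool.or_comm]

theorem dig_not_up (c : Char) (h : pvDig c = true) : pvUp c = false := by
  simp only [pvDig, pvUp, char_le_toNat, decide_eq_true_eq, Char.reduceToNat] at *
  simp only [decide_eq_false_iff_not]; omega

theorem dig_not_low (c : Char) (h : pvDig c = true) : pvLow c = false := by
  simp only [pvDig, pvLow, char_le_toNat, decide_eq_true_eq, Char.reduceToNat] at *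
  simp only [decide_eq_false_iff_not]; omega

theorem up_not_low (c : Char) (h : pvUp c = true) : pvLow c = false := by
  simp only [pvUp, pvLow, char_le_toNat, decide_eq_true_eq, Char.reduceToNat] at *
  simp only [decide_eq_false_iff_not]; omega

theorem up_not_dig (c : Char) (h : pvUp c = true) : pvDig c = false := by
  simp only [pvUp, pvDig, char_le_toNat, decide_eq_true_eq, Char.reduceToNat] at *
  simp only [decide_eq_false_iff_not]; omega

theorem low_not_dig (c : Char) (h : pvLow c = true) : pvDig c = false := by
  simp only [pvLow, pvDig, char_le_toNat, decide_eq_true_eq, Char.reduceToNat] at *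
  simp only [decide_eq_false_iff_not]; omega

-- the fold once the first letter has been seen
theorem fold_some (cs : List Char) : ∀ (d b ru rl : Bool),
    cs.foldl pvStep (d, some b, ru, rl) =
      (d || cs.any pvDig, some b,
       ru && (cs.filter pvLet).all pvUp,
       rl && (cs.filter pvLet).all pvLow) := by
  induction cs with
  | nil => intro d b ru rl; simp
  | cons c cs ih =>
    intro d b ru rl
    by_cases h1 : ('0' ≤ c ∧ c ≤ '9')
    · have hd : pvDig c = true := by simp [pvDig, h1]
      simp only [List.foldl_cons, pvStep, if_pos h1, ih, List.any_cons, List.filter_cons,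
        pvLet, dig_not_up c hd, dig_not_low c hd, hd]
      simp
    · by_cases h2 : ('A' ≤ c ∧ c ≤ 'Z')
      · have hu : pvUp c = true := by simp [pvUp, h2]
        simp only [List.foldl_cons, pvStep, if_neg h1, if_pos h2, ih, List.any_cons,
          List.filter_cons, pvLet, hu, up_not_low c hu, up_not_dig c hu]
        simp [hu, up_not_low c hu]
      · by_cases h3 : ('a' ≤ c ∧ c ≤ 'z')
        · have hl : pvLow c = true := by simp [pvLow, h3]
          have hu : pvUp c = false := by simp [pvUp, h2]
          have hd : pvDig c = false := low_not_dig c hl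
          simp only [List.foldl_cons, pvStep, if_neg h1, if_neg h2, if_pos h3, ih,
            List.any_cons, List.filter_cons, pvLet, hl, hu, hd]
          simp [hl, hu]
        · have hl : pvLow c = false := by simp [pvLow, h3]
          have hu : pvUp c = false := by simp [pvUp, h2]
          have hd : pvDig c = false := by simp [pvDig, h1]
          simp only [List.foldl_cons, pvStep, if_neg h1, if_neg h2, if_neg h3, ih,
            List.any_cons, List.filter_cons, pvLet, hl, hu, hd]
          simp

-- the fold from the initial state, characterised by the filtered letter list
theorem fold_none (cs : List Char) : ∀ (d : Bool),
    cs.foldl pvStep (d, none, true, true) =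
      (d || cs.any pvDig,
       (cs.filter pvLet).head?.map (fun ch => pvUp ch),
       ((cs.filter pvLet).drop 1).all pvUp,
       ((cs.filter pvLet).drop 1).all pvLow) := by
  induction cs with
  | nil => intro d; simp
  | cons c cs ih =>
    intro d
    by_cases h1 : ('0' ≤ c ∧ c ≤ '9')
    · have hd : pvDig c = true := by simp [pvDig, h1]
      simp only [List.foldl_cons, pvStep, if_pos h1, ih, List.any_cons, List.filter_cons,
        pvLet, dig_not_up c hd, dig_not_low c hd, hd]
      simp
    · by_cases h2 : ('A' ≤ c ∧ c ≤ 'Z')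
      · have hu : pvUp c = true := by simp [pvUp, h2]
        have hd : pvDig c = false := up_not_dig c hu
        simp only [List.foldl_cons, pvStep, if_neg h1, if_pos h2, fold_some, List.any_cons,
          List.filter_cons, pvLet, hu, hd]
        simp [hu]
      · by_cases h3 : ('a' ≤ c ∧ c ≤ 'z')
        · have hl : pvLow c = true := by simp [pvLow, h3]
          have hu : pvUp c = false := by simp [pvUp, h2]
          have hd : pvDig c = false := low_not_dig c hl
          simp only [List.foldl_cons, pvStep, if_neg h1, if_neg h2, if_pos h3, fold_some,
            List.any_cons, List.filter_cons, pvLet, hl, hu, hd]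
          simp [hu]
        · have hl : pvLow c = false := by simp [pvLow, h3]
          have hu : pvUp c = false := by simp [pvUp, h2]
          have hd : pvDig c = false := by simp [pvDig, h1]
          simp only [List.foldl_cons, pvStep, if_neg h1, if_neg h2, if_neg h3, ih,
            List.any_cons, List.filter_cons, pvLet, hl, hu, hd]
          simp

theorem head_of_filter_let (cs : List Char) (c : Char) (t : List Char)
    (h : cs.filter pvLet = c :: t) : pvLet c = true := by
  have : c ∈ cs.filter pvLet := by rw [h]; exact List.mem_cons_self
  exact (List.mem_filter.mp this).2

-- ===== VERDICT (by name: the statement is the Claim_ definition above) =====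
theorem token_case_spec : Claim_equal_token_case := by
  intro string _
  unfold Spec_token_case token_case token_case_alt
  simp only [bridge_dig, bridge_up, bridge_low, bridge_let, fold_none]
  by_cases hN : string = "*NUMBER*"
  · simp [hN]
  · by_cases hA : string.toList.any pvDig = true
    · simp [hN, hA]
    · simp only [hN, hA, false_or]
      by_cases hQ : string = "*QUOTE*"
      · simp [hQ]
      · cases hLc : string.toList.filter pvLet with
        | nil => simp [hQ]
        | cons c t =>
          have hlet : pvLet c = true := head_of_filter_let _ _ _ hLc
          cases hu : pvUp c with
          | true =>
            have hlo : pvLow c = false := up_not_low c hu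
            simp [hQ, hu, hlo]
          | false =>
            have hlo : pvLow c = true := by
              cases h' : pvLow c
              · rw [pvLet, hu, h'] at hlet; simp at hlet
              · rfl
            simp [hQ, hu, hlo]
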